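-- pv_equiv track=rewrite | github.com/peterjc/picobio | blooming_reads/blooming_reads.py | disambiguate
-- ===== SOURCE A (Python) =====
-- ambiguous_dna_values = {
--     "A": "A",
--     "C": "C",
--     "G": "G",
--     "T": "T",
--     "M": "AC",
--     "R": "AG",
--     "W": "AT",
--     "S": "CG",
--     "Y": "CT",
--     "K": "GT",
--     "V": "ACG",
--     "H": "ACT",
--     "D": "AGT",
--     "B": "CGT",
--     "X": "GATC",
--     "N": "GATC",
--     }
--
-- def disambiguate(seq):
--     good = set("ACGT")
--     if good.issuperset(seq):
--         yield seq
--     else: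
--         assert len(seq) - sum(seq.count(letter) for letter in good) < 10, \
--             "Have %i ambiguous chars in this %i sequence: %s" \
--                 % (len(seq) - sum(seq.count(letter) for letter in good), len(seq), seq)
--         for i, letter in enumerate(seq):
--             if letter not in good:
--                 for alt in ambiguous_dna_values[letter]:
--                     #Now do some recursion...
--                     #Would like to use Python 3.3+ syntax 'yield from ...' here
--                     for new in disambiguate(seq[:i] + alt + seq[i+1:]):
--                         yield new
--                 break
-- ===== SOURCE B (Python) =====
-- ambiguous_dna_values = {
--     "A": "A",
--     "C": "C",
--     "G": "G",
--     "T": "T",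
--     "M": "AC",
--     "R": "AG",
--     "W": "AT",
--     "S": "CG",
--     "Y": "CT",
--     "K": "GT",
--     "V": "ACG",
--     "H": "ACT",
--     "D": "AGT",
--     "B": "CGT",
--     "X": "GATC",
--     "N": "GATC",
--     }
--
-- def _product(lists):
--     if not lists:
--         return [[]]
--     rest = _product(lists[1:])
--     return [[b] + t for b in lists[0] for t in rest]
--
-- def disambiguate(seq):
--     good = set("ACGT")
--     positions = [(i, ambiguous_dna_values[c]) for i, c in enumerate(seq) if c not in good]
--     if not positions:
--         yield seq
--         return
--     assert len(seq) - sum(seq.count(letter) for letter in good) < 10, \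
--         "Have %i ambiguous chars in this %i sequence: %s" \
--             % (len(seq) - sum(seq.count(letter) for letter in good), len(seq), seq)
--     for combo in _product([bases for _, bases in positions]):
--         chars = list(seq)
--         for (i, _), b in zip(positions, combo):
--             chars[i] = b
--         yield "".join(chars)
-- ===== Notes on version B (the rewrite author's own statement) =====
-- stated objective: simpler
-- what changed: Replaces A's recursive generator (which re-scans and rebuilds the string with slices at every recursion level) by a single scan collecting the ambiguous positions with their allowed bases, an explicit left-to-right cartesian product of those base lists, and one substitution pass per combination.
import Mathlib
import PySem

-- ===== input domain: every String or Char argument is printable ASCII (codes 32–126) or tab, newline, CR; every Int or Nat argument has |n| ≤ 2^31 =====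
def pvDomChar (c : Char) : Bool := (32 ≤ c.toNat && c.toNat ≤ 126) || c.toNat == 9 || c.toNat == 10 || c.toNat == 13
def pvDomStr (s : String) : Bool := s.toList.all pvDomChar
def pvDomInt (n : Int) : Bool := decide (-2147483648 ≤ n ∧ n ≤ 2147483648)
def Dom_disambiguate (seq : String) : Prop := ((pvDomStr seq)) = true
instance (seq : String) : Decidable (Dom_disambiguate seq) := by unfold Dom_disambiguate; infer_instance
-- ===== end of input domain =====

-- B replaces A's slice-and-recurse generator by one scan collecting the ambiguous
-- positions plus an explicit left-to-right product; objective: simpler (no speed claim).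

-- shared module constant: membership in set("ACGT"), and the ambiguous_dna_values dict (single-char keys)
def goodChar (c : Char) : Bool := c == 'A' || c == 'C' || c == 'G' || c == 'T'

def ambValues (c : Char) : Option (List Char) :=
  if c = 'A' then some ['A']
  else if c = 'C' then some ['C']
  else if c = 'G' then some ['G']
  else if c = 'T' then some ['T']
  else if c = 'M' then some ['A','C']
  else if c = 'R' then some ['A','G']
  else if c = 'W' then some ['A','T']
  else if c = 'S' then some ['C','G']
  else if c = 'Y' then some ['C','T']
  else if c = 'K' then some ['G','T']
  else if c = 'V' then some ['A','C','G']
  else if c = 'H' then some ['A','C','T']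
  else if c = 'D' then some ['A','G','T']
  else if c = 'B' then some ['C','G','T']
  else if c = 'X' then some ['G','A','T','C']
  else if c = 'N' then some ['G','A','T','C']
  else none   -- KeyError in Python; excluded by Pre_

-- ===== PORT A =====
-- number of ambiguous chars: len(seq) - sum(seq.count(letter) for letter in good)
def ambCount (l : List Char) : Nat := (l.filter (fun c => !goodChar c)).length

-- A's 'for i, letter in enumerate(seq): if letter not in good: … break':
-- splits l at its first ambiguous char as (seq[:i], letter, seq[i+1:])
def splitAmb : List Char → Option (List Char × Char × List Char)
  | [] => none
  | c :: rest =>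
    if goodChar c then (splitAmb rest).map (fun p => (c :: p.1, p.2.1, p.2.2))
    else some ([], c, rest)

-- the next three lemmas are cited by disambList's decreasing_by (termination of the port)
theorem splitAmb_eq {l : List Char} {pre : List Char} {c : Char} {post : List Char}
    (h : splitAmb l = some (pre, c, post)) :
    l = pre ++ c :: post ∧ pre.all goodChar = true ∧ goodChar c = false := by
  induction l generalizing pre c post with
  | nil => simp [splitAmb] at h
  | cons x xs ih =>
    by_cases hx : goodChar x = true
    · rw [splitAmb, if_pos hx] at h
      cases hsx : splitAmb xs with
      | none => rw [hsx] at h; cases h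
      | some q =>
        obtain ⟨p', c', post'⟩ := q
        rw [hsx] at h
        simp only [Option.map_some, Option.some.injEq, Prod.mk.injEq] at h
        obtain ⟨h1, h2, h3⟩ := h
        obtain ⟨he, hg, hb⟩ := ih hsx
        subst h1 h2 h3
        refine ⟨by rw [he]; rfl, ?_, hb⟩
        simp [List.all_cons, hx, hg]
    · rw [splitAmb, if_neg hx] at h
      simp only [Option.some.injEq, Prod.mk.injEq] at h
      obtain ⟨h1, h2, h3⟩ := h
      subst h1 h2 h3
      exact ⟨rfl, rfl, by simpa using hx⟩

set_option maxHeartbeats 1000000 in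
theorem ambValues_good {c : Char} {alts : List Char} (h : ambValues c = some alts) :
    ∀ a ∈ alts, goodChar a = true := by
  intro a ha
  unfold ambValues at h
  by_cases h0 : c = 'A'
  · rw [if_pos h0] at h; injection h with h; subst h; fin_cases ha <;> decide
  rw [if_neg h0] at h
  by_cases h1 : c = 'C'
  · rw [if_pos h1] at h; injection h with h; subst h; fin_cases ha <;> decide
  rw [if_neg h1] at h
  by_cases h2 : c = 'G'
  · rw [if_pos h2] at h; injection h with h; subst h; fin_cases ha <;> decide
  rw [if_neg h2] at h
  by_cases h3 : c = 'T'
  · rw [if_pos h3] at h; injection h with h; subst h; fin_cases ha <;> decide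
  rw [if_neg h3] at h
  by_cases h4 : c = 'M'
  · rw [if_pos h4] at h; injection h with h; subst h; fin_cases ha <;> decide
  rw [if_neg h4] at h
  by_cases h5 : c = 'R'
  · rw [if_pos h5] at h; injection h with h; subst h; fin_cases ha <;> decide
  rw [if_neg h5] at h
  by_cases h6 : c = 'W'
  · rw [if_pos h6] at h; injection h with h; subst h; fin_cases ha <;> decide
  rw [if_neg h6] at h
  by_cases h7 : c = 'S'
  · rw [if_pos h7] at h; injection h with h; subst h; fin_cases ha <;> decide
  rw [if_neg h7] at h
  by_cases h8 : c = 'Y'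
  · rw [if_pos h8] at h; injection h with h; subst h; fin_cases ha <;> decide
  rw [if_neg h8] at h
  by_cases h9 : c = 'K'
  · rw [if_pos h9] at h; injection h with h; subst h; fin_cases ha <;> decide
  rw [if_neg h9] at h
  by_cases h10 : c = 'V'
  · rw [if_pos h10] at h; injection h with h; subst h; fin_cases ha <;> decide
  rw [if_neg h10] at h
  by_cases h11 : c = 'H'
  · rw [if_pos h11] at h; injection h with h; subst h; fin_cases ha <;> decide
  rw [if_neg h11] at h
  by_cases h12 : c = 'D'
  · rw [if_pos h12] at h; injection h with h; subst h; fin_cases ha <;> decide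
  rw [if_neg h12] at h
  by_cases h13 : c = 'B'
  · rw [if_pos h13] at h; injection h with h; subst h; fin_cases ha <;> decide
  rw [if_neg h13] at h
  by_cases h14 : c = 'X'
  · rw [if_pos h14] at h; injection h with h; subst h; fin_cases ha <;> decide
  rw [if_neg h14] at h
  by_cases h15 : c = 'N'
  · rw [if_pos h15] at h; injection h with h; subst h; fin_cases ha <;> decide
  rw [if_neg h15] at h
  cases h

theorem ambCount_append (l₁ l₂ : List Char) :
    ambCount (l₁ ++ l₂) = ambCount l₁ + ambCount l₂ := by
  simp [ambCount, List.filter_append]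

theorem ambCount_good {l : List Char} (h : l.all goodChar = true) : ambCount l = 0 := by
  simp only [ambCount, List.length_eq_zero_iff, List.filter_eq_nil_iff]
  intro a ha
  simp [List.all_eq_true] at h
  simp [h a ha]

theorem ambCount_sub {pre : List Char} {post : List Char} {a : Char}
    (hpre : pre.all goodChar = true) (hga : goodChar a = true) :
    ambCount (pre ++ a :: post) = ambCount post := by
  have h1 : ambCount (a :: post) = ambCount post := by
    simp [ambCount, List.filter_cons, hga]
  simp [ambCount_append, ambCount_good hpre, h1]

def disambList (l : List Char) : List (List Char) :=
  if l.all goodChar then [l]                 -- good.issuperset(seq): yield seq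
  else if 10 ≤ ambCount l then []            -- assert fails (AssertionError), outside Pre_
  else
    match hs : splitAmb l with
    | none => []                             -- unreachable: not all good
    | some (pre, letter, post) =>
      match hv : ambValues letter with
      | none => []                           -- KeyError, outside Pre_
      | some alts =>
        -- for alt in ambiguous_dna_values[letter]: for new in disambiguate(seq[:i]+alt+seq[i+1:]): yield new
        alts.attach.flatMap (fun a => disambList (pre ++ a.1 :: post))
termination_by ambCount l
decreasing_by
  obtain ⟨he, hg, hb⟩ := splitAmb_eq hs
  have hga := ambValues_good hv a.1 a.2
  rw [ambCount_sub hg hga, he, ambCount_append]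
  have h1 : ambCount (letter :: post) = ambCount post + 1 := by
    simp [ambCount, List.filter_cons, hb]
  omega

def disambiguate (seq : String) : List String :=
  (disambList seq.toList).map String.mk

-- ===== PORT B =====
-- [(i, ambiguous_dna_values[c]) for i, c in enumerate(seq) if c not in good]
def positionsOf : Nat → List Char → List (Nat × List Char)
  | _, [] => []
  | i, c :: rest =>
    if goodChar c then positionsOf (i+1) rest
    else (i, (ambValues c).getD []) :: positionsOf (i+1) rest
      -- getD []: on Pre_ inputs the lookup always succeeds (Python raises KeyError otherwise)

-- _product(lists): recursive cartesian product, left factor outermost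
def productL : List (List Char) → List (List Char)
  | [] => [[]]
  | bs :: rest => bs.flatMap (fun b => (productL rest).map (fun t => b :: t))

-- chars = list(seq); for (i, _), b in zip(positions, combo): chars[i] = b
def buildSubst : List Char → List ((Nat × List Char) × Char) → List Char
  | l, [] => l
  | l, ((i, _), b) :: rest => buildSubst (l.set i b) rest

def disambListB (l : List Char) : List (List Char) :=
  let positions := positionsOf 0 l
  if positions.isEmpty then [l]
  else if 10 ≤ ambCount l then []            -- same assert expression as A's
  else (productL (positions.map Prod.snd)).map (fun combo => buildSubst l (positions.zip combo))

def disambiguate_alt (seq : String) : List String :=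
  (disambListB seq.toList).map String.mk

-- ===== PRECONDITION & SPEC =====
-- Pre_ excludes exactly the inputs where A raises: a char that is no key of the dict
-- (KeyError) or ≥ 10 ambiguous chars (AssertionError); A returns on everything else.
def Pre_disambiguate (seq : String) : Prop :=
  (seq.toList.all (fun c =>
      decide (c ∈ (['A','C','G','T','M','R','W','S','Y','K','V','H','D','B','X','N'] : List Char)))) = true ∧
  (seq.toList.filter (fun c => c ∉ (['A','C','G','T'] : List Char))).length < 10
instance (seq : String) : Decidable (Pre_disambiguate seq) := by unfold Pre_disambiguate; infer_instance

def pvWitness_disambiguate : String := "ACRNT"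

def Spec_disambiguate (seq : String) (out : List String) : Prop := out = disambiguate_alt seq
instance (seq : String) (out : List String) : Decidable (Spec_disambiguate seq out) := by unfold Spec_disambiguate; infer_instance

-- ===== CLAIM (what is proved, stated in full; the proofs are below) =====
def Claim_equal_disambiguate : Prop := ∀ (seq : String), Dom_disambiguate seq → Pre_disambiguate seq → Spec_disambiguate seq (disambiguate seq)

-- ===== LEMMAS AND PROOFS =====

theorem splitAmb_none {l : List Char} (h : splitAmb l = none) : l.all goodChar = true := by
  induction l with
  | nil => rfl
  | cons x xs ih =>
    by_cases hx : goodChar x = true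
    · rw [splitAmb, if_pos hx] at h
      cases hsx : splitAmb xs with
      | none => simp [List.all_cons, hx, ih hsx]
      | some q => rw [hsx] at h; cases h
    · rw [splitAmb, if_neg hx] at h; cases h

theorem positionsOf_nil_iff (i : Nat) (l : List Char) :
    positionsOf i l = [] ↔ l.all goodChar = true := by
  induction l generalizing i with
  | nil => simp [positionsOf]
  | cons c rest ih =>
    by_cases hc : goodChar c = true <;> simp [positionsOf, hc, ih]

theorem positionsOf_split (i : Nat) {pre : List Char} (c : Char) (post : List Char)
    (hpre : pre.all goodChar = true) (hc : goodChar c = false) :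
    positionsOf i (pre ++ c :: post) =
      (i + pre.length, (ambValues c).getD []) :: positionsOf (i + pre.length + 1) post := by
  induction pre generalizing i with
  | nil => simp [positionsOf, hc]
  | cons x xs ih =>
    rw [List.all_cons, Bool.and_eq_true] at hpre
    simp only [List.cons_append, positionsOf, hpre.1, if_true]
    rw [ih (i+1) hpre.2]
    simp only [List.length_cons]
    have h1 : i + 1 + xs.length = i + (xs.length + 1) := by omega
    rw [h1]

theorem positionsOf_good_append (i : Nat) {pre : List Char} (post : List Char)
    (hpre : pre.all goodChar = true) :
    positionsOf i (pre ++ post) = positionsOf (i + pre.length) post := by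
  induction pre generalizing i with
  | nil => simp
  | cons x xs ih =>
    rw [List.all_cons, Bool.and_eq_true] at hpre
    simp only [List.cons_append, positionsOf, hpre.1, if_true]
    rw [ih (i+1) hpre.2]
    simp only [List.length_cons]
    have h1 : i + 1 + xs.length = i + (xs.length + 1) := by omega
    rw [h1]

theorem set_append_len {pre : List Char} (c b : Char) (post : List Char) :
    (pre ++ c :: post).set pre.length b = pre ++ b :: post := by
  induction pre with
  | nil => simp
  | cons x xs ih => simp [ih]

-- B(l) for l = pre ++ c :: post (pre good, c ambiguous, < 10 ambiguous chars) unfolds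
-- to the flatMap over the first ambiguous position's bases of B on the substituted string
theorem disambListB_step {pre : List Char} {c : Char} {post : List Char}
    (hpre : pre.all goodChar = true) (hc : goodChar c = false)
    (hcnt : ambCount (pre ++ c :: post) < 10) :
    disambListB (pre ++ c :: post) =
      ((ambValues c).getD []).flatMap (fun b => disambListB (pre ++ b :: post)) := by
  have hP := positionsOf_split 0 c post hpre hc
  simp only [Nat.zero_add] at hP
  unfold disambListB
  rw [hP]
  simp only [List.isEmpty_cons, if_false, Bool.false_eq_true]
  rw [if_neg (by omega)]
  simp only [List.map_cons, productL, List.map_flatMap, List.flatMap_map]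
  apply List.flatMap_congr
  intro b hb
  have hgb : goodChar b = true := by
    cases hv : ambValues c with
    | none => rw [hv] at hb; simp at hb
    | some alts => exact ambValues_good hv b (by rwa [hv] at hb)
  have hPb : positionsOf 0 (pre ++ b :: post) = positionsOf (pre.length + 1) post := by
    have he : pre ++ b :: post = (pre ++ [b]) ++ post := by simp
    rw [he, positionsOf_good_append 0 post (by simp [List.all_append, hpre, hgb])]
    simp
  have hcntb : ambCount (pre ++ b :: post) = ambCount post := ambCount_sub hpre hgb
  have hcnt' : ambCount (pre ++ c :: post) = ambCount post + 1 := by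
    rw [ambCount_append, ambCount_good hpre]
    simp [ambCount, List.filter_cons, hc]
  have hset : ∀ (rest : List ((Nat × List Char) × Char)),
      buildSubst (pre ++ c :: post) (((pre.length, (ambValues c).getD []), b) :: rest)
        = buildSubst (pre ++ b :: post) rest := by
    intro rest
    simp [buildSubst, set_append_len]
  cases hPpost : positionsOf (pre.length + 1) post with
  | nil =>
    rw [hPb, hPpost]
    simp [productL, List.zip, buildSubst, set_append_len]
  | cons q qs =>
    rw [hPb, hPpost]
    simp only [List.isEmpty_cons, if_false, Bool.false_eq_true]
    rw [if_neg (by omega)]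
    simp only [List.map_map]
    apply List.map_congr_left
    intro t ht
    simp only [Function.comp_apply, List.zip_cons_cons, hset]

theorem disambList_eq_alt (n : Nat) : ∀ l : List Char, ambCount l ≤ n →
    disambList l = disambListB l := by
  induction n with
  | zero =>
    intro l hn
    have hall : l.all goodChar = true := by
      simp only [List.all_eq_true]
      intro a ha
      by_contra hbad
      have hpos : 0 < ambCount l := by
        simp [ambCount, List.length_pos_iff]
        exact ⟨a, ha, by simpa using hbad⟩
      omega
    rw [disambList, if_pos hall, disambListB]
    simp [(positionsOf_nil_iff 0 l).mpr hall]
  | succ n ih =>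
    intro l hn
    by_cases hall : l.all goodChar = true
    · rw [disambList, if_pos hall, disambListB]
      simp [(positionsOf_nil_iff 0 l).mpr hall]
    · cases hs : splitAmb l with
      | none => exact absurd (splitAmb_none hs) hall
      | some t =>
        obtain ⟨pre, letter, post⟩ := t
        obtain ⟨he, hg, hb⟩ := splitAmb_eq hs
        by_cases hcnt : 10 ≤ ambCount l
        · rw [disambList, if_neg hall, if_pos hcnt]
          rw [disambListB]
          have hne : positionsOf 0 l ≠ [] := by
            rw [Ne, positionsOf_nil_iff]; exact fun h => hall h
          simp only [List.isEmpty_iff]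
          rw [if_neg hne, if_pos hcnt]
        · push_neg at hcnt
          subst he
          rw [disambListB_step hg hb hcnt]
          rw [disambList.eq_def]
          rw [if_neg hall, if_neg (by omega)]
          have h2 : ambCount (pre ++ letter :: post) = ambCount post + 1 := by
            rw [ambCount_append, ambCount_good hg]
            simp [ambCount, List.filter_cons, hb]
          split
          · next heq => rw [heq] at hs; cases hs
          · next pre' letter' post' heq =>
            rw [heq] at hs
            injection hs with hs
            injection hs with e1 e23
            injection e23 with e2 e3
            subst e1; subst e2; subst e3
            split
            · next heq2 => rw [heq2]; simp
            · next alts heq2 =>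
              rw [heq2]
              simp only [Option.getD_some]
              have hattach : alts.attach.flatMap (fun a => disambList (pre' ++ a.1 :: post'))
                    = alts.flatMap (fun a => disambList (pre' ++ a :: post')) := by
                rw [← List.flatMap_map]
                rw [show List.map (fun (a : {x // x ∈ alts}) => pre' ++ a.1 :: post') alts.attach
                      = List.map (fun a => pre' ++ a :: post') alts by simp]
                rw [List.flatMap_map]
              rw [hattach]
              apply List.flatMap_congr
              intro a ha
              have hga : goodChar a = true := ambValues_good heq2 a ha
              apply ih
              have h1 : ambCount (pre' ++ a :: post') = ambCount post' := ambCount_sub hg hga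
              omega

-- ===== VERDICT (by name: the statement is the Claim_ definition above) =====
theorem disambiguate_spec : Claim_equal_disambiguate := by
  intro seq _ _
  unfold Spec_disambiguate disambiguate disambiguate_alt
  rw [disambList_eq_alt (ambCount seq.toList) seq.toList (le_refl _)]
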